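-- pv_equiv track=rewrite | github.com/prathyand/Tetris-AI-Bot | quintris.py | heur
-- ===== SOURCE A (Python) =====
-- import copy
--
-- def heur(brd):
--     hr=0
--     brd2=copy.copy(brd)
--     for i in range(len(brd2)):
--         brd2[i]=[0 if x==' ' else x for x in list(brd2[i])] #fill empty space with 0
--     for i in range(len(brd)):
--         for j in range(len(brd[0])):
--             if(brd[i][j]=='x'):
--                 continue
--             if(i!=0):
--                 if([foo[j] for foo in brd2[0:i]].count('x')>0):#If the given position is bloacked from above
--                     hr+=(len(brd)-i+2)**4 # increase hr by (height of the position +2)**4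
--             if(j!=0):
--                 if(brd[i][j-1]=='x'):#If the given position is bloacked from left side
--                     hr+=(len(brd)-i+2)**2 #increase hr by (height of the position +2)**2
--             if(j!=len(brd[0])-1):
--                 if(brd[i][j+1]=='x'):#If the given position is bloacked from right side
--                     hr+=(len(brd)-i+2)**2 #increase hr by (height of the position +2)**2
--     return hr
-- ===== SOURCE B (Python) =====
-- def heur(brd):
--     # One top-down pass: per-column "x seen above" flags replace the repeated
--     # column scans over brd[0:i], O(rows*cols) instead of O(rows^2*cols).
--     if not brd:
--         return 0
--     n = len(brd)
--     w = len(brd[0])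
--     hr = 0
--     above = [False] * w
--     for i, row in enumerate(brd):
--         h2 = (n - i + 2) ** 2
--         h4 = h2 * h2
--         for j in range(w):
--             if row[j] == 'x':
--                 continue
--             if above[j]:
--                 hr += h4
--             if j > 0 and row[j - 1] == 'x':
--                 hr += h2
--             if j + 1 < w and row[j + 1] == 'x':
--                 hr += h2
--         above = [a or row[j] == 'x' for j, a in enumerate(above)]
--     return hr
-- ===== Notes on version B (the rewrite author's own statement) =====
-- stated objective: faster
-- what changed: Replaces the per-cell rescan of the whole column above (brd[0:i] count of 'x') by per-column 'x seen above' boolean flags maintained incrementally in one top-down pass.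
import Mathlib
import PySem

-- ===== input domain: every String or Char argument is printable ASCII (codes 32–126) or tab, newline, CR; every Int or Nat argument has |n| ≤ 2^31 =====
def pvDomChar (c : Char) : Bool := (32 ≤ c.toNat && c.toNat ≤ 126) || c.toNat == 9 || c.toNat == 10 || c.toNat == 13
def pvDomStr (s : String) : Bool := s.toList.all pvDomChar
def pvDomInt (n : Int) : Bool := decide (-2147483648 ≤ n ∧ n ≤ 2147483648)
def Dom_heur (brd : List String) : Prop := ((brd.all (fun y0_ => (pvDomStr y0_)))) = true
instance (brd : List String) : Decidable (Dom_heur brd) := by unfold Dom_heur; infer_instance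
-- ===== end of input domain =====

-- B replaces A's per-cell rescan of the column above by per-column boolean
-- flags maintained in one top-down pass (objective: faster, asymptotic).

-- ===== PORT A =====
-- literal port of A; mixed-type list [0 if x==' ' else x] is rendered as
-- Option Char (none = the int 0, which never equals 'x'); in-range indexing
-- (guaranteed by Pre_heur) is rendered with getD.
def heur (brd : List String) : Int :=
  let brd2 : List (List (Option Char)) :=
    brd.map (fun s => s.toList.map (fun x => if x = ' ' then none else some x))
  let n := brd.length
  (List.range n).foldl (fun hr i =>
    (List.range (brd.headD "").toList.length).foldl (fun hr j =>
      let row := (brd.getD i "").toList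
      if row.getD j ' ' = 'x' then hr
      else
        let hr := if i ≠ 0 ∧ 0 < ((brd2.take i).map (fun foo => foo.getD j none)).count (some 'x')
                  then hr + ((n : Int) - (i : Int) + 2) ^ 4 else hr
        let hr := if j ≠ 0 ∧ row.getD (j - 1) ' ' = 'x'
                  then hr + ((n : Int) - (i : Int) + 2) ^ 2 else hr
        if j ≠ (brd.headD "").toList.length - 1 ∧ row.getD (j + 1) ' ' = 'x'
        then hr + ((n : Int) - (i : Int) + 2) ^ 2 else hr) hr) 0

-- ===== PORT B =====
-- literal port of Source B (one pass, per-column above-flags).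
def heur_alt (brd : List String) : Int :=
  if brd = [] then 0
  else
    let n := brd.length
    let w := (brd.headD "").toList.length
    ((PySem.List.enumerate (brd.map String.toList)).foldl
      (fun (st : Int × List Bool) p =>
        let i := p.1
        let row := p.2
        let h2 : Int := ((n : Int) - i + 2) ^ 2
        let h4 := h2 * h2
        let hr := (List.range w).foldl (fun hr j =>
          if row.getD j ' ' = 'x' then hr
          else
            let hr := if st.2.getD j false then hr + h4 else hr
            let hr := if 0 < j ∧ row.getD (j - 1) ' ' = 'x' then hr + h2 else hr
            if j + 1 < w ∧ row.getD (j + 1) ' ' = 'x' then hr + h2 else hr) st.1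
        let above := (PySem.List.enumerate st.2).map
          (fun q => q.2 || decide (row.getD q.1.toNat ' ' = 'x'))
        (hr, above))
      (0, List.replicate w false)).1

-- ===== PRECONDITION & SPEC =====
-- Pre_heur excludes ragged boards on which some row is shorter than row 0:
-- there A (and B) raise IndexError when indexing that row at a column of row 0.
def Pre_heur (brd : List String) : Prop :=
  ∀ s ∈ brd, (brd.headD "").toList.length ≤ s.toList.length
instance (brd : List String) : Decidable (Pre_heur brd) := by unfold Pre_heur; infer_instance
def pvWitness_heur : List String := ["x  ", " x ", "   "]

def Spec_heur (brd : List String) (out : Int) : Prop := out = heur_alt brd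
instance (brd : List String) (out : Int) : Decidable (Spec_heur brd out) := by unfold Spec_heur; infer_instance

-- ===== CLAIM (what is proved, stated in full; the proofs are below) =====
def Claim_equal_heur : Prop := ∀ (brd : List String), Dom_heur brd → Pre_heur brd → Spec_heur brd (heur brd)

-- ===== LEMMAS AND PROOFS =====

-- summand of A's inner loop (verbatim from the port's body)
def gA (brd : List String) (i j : Nat) : Int :=
  let n := brd.length
  let w := (brd.headD "").toList.length
  let row := (brd.getD i "").toList
  if row.getD j ' ' = 'x' then 0
  else
    (if i ≠ 0 ∧ 0 < (((brd.map (fun s => s.toList.map (fun x => if x = ' ' then none else some x))).take i).map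
          (fun foo => foo.getD j none)).count (some 'x')
     then ((n : Int) - (i : Int) + 2) ^ 4 else 0)
    + (if j ≠ 0 ∧ row.getD (j - 1) ' ' = 'x' then ((n : Int) - (i : Int) + 2) ^ 2 else 0)
    + (if j ≠ w - 1 ∧ row.getD (j + 1) ' ' = 'x' then ((n : Int) - (i : Int) + 2) ^ 2 else 0)

def specSum (brd : List String) : Int :=
  ((List.range brd.length).map (fun i =>
    ((List.range (brd.headD "").toList.length).map (gA brd i)).sum)).sum

-- summand of B's inner loop
def gB (n w : Nat) (i : Int) (ab : List Bool) (row : List Char) (j : Nat) : Int :=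
  if row.getD j ' ' = 'x' then 0
  else
    (if ab.getD j false then ((n : Int) - i + 2) ^ 2 * ((n : Int) - i + 2) ^ 2 else 0)
    + (if 0 < j ∧ row.getD (j - 1) ' ' = 'x' then ((n : Int) - i + 2) ^ 2 else 0)
    + (if j + 1 < w ∧ row.getD (j + 1) ' ' = 'x' then ((n : Int) - i + 2) ^ 2 else 0)

-- B's loop step, named (definitionally the body in heur_alt)
def stepB (n w : Nat) (st : Int × List Bool) (p : Int × List Char) : Int × List Bool :=
  let i := p.1
  let row := p.2
  let h2 : Int := ((n : Int) - i + 2) ^ 2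
  let h4 := h2 * h2
  let hr := (List.range w).foldl (fun hr j =>
    if row.getD j ' ' = 'x' then hr
    else
      let hr := if st.2.getD j false then hr + h4 else hr
      let hr := if 0 < j ∧ row.getD (j - 1) ' ' = 'x' then hr + h2 else hr
      if j + 1 < w ∧ row.getD (j + 1) ' ' = 'x' then hr + h2 else hr) st.1
  let above := (PySem.List.enumerate st.2).map
    (fun q => q.2 || decide (row.getD q.1.toNat ' ' = 'x'))
  (hr, above)

def blocked (rows : List (List Char)) (j : Nat) : Bool :=
  rows.any (fun r => r.getD j ' ' = 'x')

lemma heurAlt_eq (brd : List String) :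
    heur_alt brd = if brd = [] then 0 else
      ((PySem.List.enumerate (brd.map String.toList)).foldl
        (stepB brd.length (brd.headD "").toList.length)
        (0, List.replicate (brd.headD "").toList.length false)).1 := rfl

-- A equals the double sum of gA
lemma heur_eq_specSum (brd : List String) : heur brd = specSum brd := by
  simp only [heur, specSum]
  rw [PySem.List.foldl_congr_mem _ _
        (fun hr i => hr + ((List.range (brd.headD "").toList.length).map (gA brd i)).sum) _ ?_,
      PySem.List.foldl_add, zero_add]
  intro acc i _
  rw [PySem.List.foldl_congr_mem _ _ (fun hr j => hr + gA brd i j) _ ?_,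
      PySem.List.foldl_add]
  intro a j _
  simp only [gA]
  split_ifs <;> ring

-- B's inner loop sums gB
lemma stepB_fst (n w : Nat) (st : Int × List Bool) (p : Int × List Char) :
    (stepB n w st p).1 = st.1 + ((List.range w).map (gB n w p.1 st.2 p.2)).sum := by
  simp only [stepB]
  rw [PySem.List.foldl_congr_mem _ _ (fun hr j => hr + gB n w p.1 st.2 p.2 j) _ ?_,
      PySem.List.foldl_add]
  intro a j _
  simp only [gB]
  split_ifs <;> ring

-- new above flags, pointwise
lemma stepB_snd_getD (n w : Nat) (st : Int × List Bool) (p : Int × List Char) (j : Nat)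
    (hj : j < st.2.length) :
    (stepB n w st p).2.getD j false = (st.2.getD j false || decide (p.2.getD j ' ' = 'x')) := by
  simp [stepB, List.getD_eq_getElem?_getD, List.getElem?_map, PySem.List.getElem?_enumerate,
        List.getElem?_eq_getElem hj]
  rfl

lemma stepB_snd_length (n w : Nat) (st : Int × List Bool) (p : Int × List Char) :
    (stepB n w st p).2.length = st.2.length := by
  simp [stepB, PySem.List.length_enumerate]

-- A's blocked-from-above condition characterised, under Pre_
lemma condA_iff (brd : List String) (hpre : Pre_heur brd) (i j : Nat)
    (hj : j < (brd.headD "").toList.length) :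
    ((i ≠ 0 ∧ 0 < (((brd.map (fun s => s.toList.map (fun x => if x = ' ' then none else some x))).take i).map
          (fun foo => foo.getD j none)).count (some 'x'))
      ↔ blocked ((brd.map String.toList).take i) j = true) := by
  rw [List.count_pos_iff, List.mem_map]
  simp only [blocked, ← List.map_take, List.any_map, List.any_eq_true, Function.comp]
  constructor
  · rintro ⟨-, foo, hfoo, hval⟩
    rcases List.mem_map.mp hfoo with ⟨s, hs, rfl⟩
    refine ⟨s, hs, ?_⟩
    have hw : j < s.toList.length :=
      lt_of_lt_of_le hj (hpre s (List.mem_of_mem_take hs))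
    rw [List.getD_eq_getElem _ _ (by simpa using hw)] at hval
    rw [List.getElem_map] at hval
    rw [List.getD_eq_getElem _ _ hw]
    by_cases hsp : s.toList[j] = ' '
    · simp [hsp] at hval
    · simp [hsp] at hval
      simp [hval]
  · rintro ⟨s, hs, hval⟩
    have hw : j < s.toList.length :=
      lt_of_lt_of_le hj (hpre s (List.mem_of_mem_take hs))
    rw [List.getD_eq_getElem _ _ hw] at hval
    constructor
    · rintro rfl
      simp at hs
    · refine ⟨_, List.mem_map_of_mem hs, ?_⟩
      rw [List.getD_eq_getElem _ _ (by simpa using hw), List.getElem_map]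
      have hx : s.toList[j] = 'x' := by simpa using hval
      simp [hx]

-- pointwise: with the invariant above-flags, B's summand equals A's
lemma gB_eq_gA (brd : List String) (hpre : Pre_heur brd) (i : Nat) (hi : i < brd.length)
    (ab : List Bool)
    (hab : ∀ j < (brd.headD "").toList.length,
      ab.getD j false = blocked ((brd.map String.toList).take i) j)
    (j : Nat) (hj : j < (brd.headD "").toList.length) :
    gB brd.length (brd.headD "").toList.length (i : Int) ab ((brd.map String.toList).getD i []) j
      = gA brd i j := by
  have hrow : (brd.map String.toList).getD i [] = (brd.getD i "").toList := by
    rw [List.getD_eq_getElem _ _ (by simpa using hi), List.getD_eq_getElem _ _ hi,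
        List.getElem_map]
  have hiff1 : (ab.getD j false = true) ↔
      (i ≠ 0 ∧ 0 < (((brd.map (fun s => s.toList.map (fun x => if x = ' ' then none else some x))).take i).map
        (fun foo => foo.getD j none)).count (some 'x')) := by
    rw [hab j hj, condA_iff brd hpre i j hj]
  have hiff2 : ∀ (P : Prop), ((0 < j ∧ P) ↔ (j ≠ 0 ∧ P)) := by
    intro P
    constructor <;> (rintro ⟨h1, h2⟩; exact ⟨by omega, h2⟩)
  have hiff3 : ∀ (P : Prop),
      ((j + 1 < (brd.headD "").toList.length ∧ P) ↔ (j ≠ (brd.headD "").toList.length - 1 ∧ P)) := by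
    intro P
    constructor <;> (rintro ⟨h1, h2⟩; exact ⟨by omega, h2⟩)
  have hpow : ((brd.length : Int) - (i : Int) + 2) ^ 2 * ((brd.length : Int) - (i : Int) + 2) ^ 2
      = ((brd.length : Int) - (i : Int) + 2) ^ 4 := by ring
  simp only [gB, gA, hrow, hiff1, hiff2, hiff3, hpow]

-- main loop invariant
lemma loopB (brd : List String) (hpre : Pre_heur brd) :
    ∀ (rs : List (List Char)) (i0 : Nat) (ab : List Bool) (acc : Int),
      rs = (brd.map String.toList).drop i0 →
      ab.length = (brd.headD "").toList.length →
      (∀ j < (brd.headD "").toList.length,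
        ab.getD j false = blocked ((brd.map String.toList).take i0) j) →
      ((PySem.List.enumerate rs (i0 : Int)).foldl
          (stepB brd.length (brd.headD "").toList.length) (acc, ab)).1
        = acc + ((List.range rs.length).map (fun k =>
            ((List.range (brd.headD "").toList.length).map (gA brd (i0 + k))).sum)).sum := by
  intro rs
  induction rs with
  | nil => intro i0 ab acc _ _ _; simp [PySem.List.enumerate]
  | cons r rs' IH =>
    intro i0 ab acc hrs hablen hab
    set rows := brd.map String.toList with hrows
    set w := (brd.headD "").toList.length with hw
    have hi0 : i0 < rows.length := by
      by_contra hle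
      rw [List.drop_eq_nil_of_le (by omega)] at hrs
      exact (List.cons_ne_nil r rs') hrs
    have hcons : rows.drop i0 = rows[i0] :: rows.drop (i0 + 1) :=
      List.drop_eq_getElem_cons hi0
    rw [hcons] at hrs
    obtain ⟨hr, hrs'⟩ := List.cons_eq_cons.mp hrs
    rw [PySem.List.enumerate_cons, List.foldl_cons]
    set st' := stepB brd.length w (acc, ab) ((i0 : Int), r) with hst'
    have hpush : ((i0 : Int) + 1) = ((i0 + 1 : Nat) : Int) := by push_cast; ring
    have hIH := IH (i0 + 1) st'.2 st'.1 hrs'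
      (by rw [stepB_snd_length]; exact hablen)
      (by
        intro j hj
        rw [hst', stepB_snd_getD brd.length w (acc, ab) ((i0 : Int), r) j (by
              simpa [hablen] using hj)]
        have htake : rows.take (i0 + 1) = rows.take i0 ++ [rows[i0]] := by
          rw [List.take_add_one, List.getElem?_eq_getElem hi0]
          rfl
        simp only [blocked, htake, List.any_append, List.any_cons, List.any_nil]
        rw [hab j hj, hr]
        simp [blocked])
    rw [hpush, hIH]
    have hscore : (st'.1 : Int) = acc + ((List.range w).map (gA brd i0)).sum := by
      rw [hst', stepB_fst]
      congr 1
      apply congrArg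
      apply List.map_congr_left
      intro j hjm
      have hj' : j < w := List.mem_range.mp hjm
      have hr' : r = rows.getD i0 [] := by
        rw [hr, List.getD_eq_getElem _ _ hi0]
      rw [hr']
      exact gB_eq_gA brd hpre i0 (by simpa [hrows] using hi0) ab hab j hj'
    rw [hscore]
    have hlen : (r :: rs').length = rs'.length + 1 := rfl
    rw [hlen, List.range_succ_eq_map, List.map_cons, List.map_map, List.sum_cons]
    have hshift : ((List.range rs'.length).map
          ((fun k => ((List.range w).map (gA brd (i0 + k))).sum) ∘ Nat.succ))
        = (List.range rs'.length).map (fun k => ((List.range w).map (gA brd (i0 + 1 + k))).sum) := by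
      apply List.map_congr_left
      intro k _
      simp only [Function.comp]
      rw [show i0 + Nat.succ k = i0 + 1 + k by omega]
    rw [hshift]
    rw [add_assoc]
    norm_num

lemma heurAlt_eq_specSum (brd : List String) (hpre : Pre_heur brd) :
    heur_alt brd = specSum brd := by
  by_cases hnil : brd = []
  · subst hnil
    simp [heur_alt, specSum]
  · rw [heurAlt_eq, if_neg hnil]
    have h0 := loopB brd hpre (brd.map String.toList) 0
      (List.replicate (brd.headD "").toList.length false) 0 (by simp)
      (by simp)
      (by
        intro j hj
        rw [List.getD_replicate false hj]
        simp [blocked])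
    rw [show ((0 : Nat) : Int) = (0 : Int) from rfl] at h0
    rw [h0, zero_add, specSum]
    simp only [List.length_map]
    congr 1
    apply List.map_congr_left
    intro k _
    simp

-- ===== VERDICT (by name: the statement is the Claim_ definition above) =====
theorem heur_spec : Claim_equal_heur := by
  intro brd _ hpre
  unfold Spec_heur
  rw [heur_eq_specSum, heurAlt_eq_specSum brd hpre]
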